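-- pv_equiv track=rewrite | github.com/bacoords/woo-dev-blog-tools | update-release-pr-spreadsheet.py | parse_themes
-- ===== SOURCE A (Python) =====
-- def parse_themes(themes_analysis):
--     """Parse the themes from the OpenAI response."""
--     themes = []
--     current_theme = None
--
--     # Simple parsing logic - can be enhanced based on actual response format
--     for line in themes_analysis.split('\n'):
--         if line.strip().startswith(('1.', '2.', '3.', '4.', '5.', '6.', '7.', '8.', '9.')):
--             if current_theme:
--                 themes.append(current_theme)
--             theme_name = line.split('.', 1)[1].strip()
--             current_theme = {'name': theme_name, 'prs': ''}
--         elif current_theme and 'Related PRs:' in line: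
--             current_theme['prs'] = line.split('Related PRs:', 1)[1].strip()
--
--     if current_theme:
--         themes.append(current_theme)
--
--     return themes
-- ===== SOURCE B (Python) =====
-- def parse_themes(themes_analysis):
--     """Parse the themes from the OpenAI response (block-wise re-implementation)."""
--     HEADS = ('1.', '2.', '3.', '4.', '5.', '6.', '7.', '8.', '9.')
--
--     def is_header(line):
--         return line.strip().startswith(HEADS)
--
--     lines = themes_analysis.split('\n')
--     n = len(lines)
--     i = 0
--     while i < n and not is_header(lines[i]):
--         i += 1  # ignore everything before the first numbered header
--     themes = []
--     while i < n:
--         header = lines[i]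
--         i += 1
--         body = []
--         while i < n and not is_header(lines[i]):
--             body.append(lines[i])
--             i += 1
--         marked = [l for l in body if 'Related PRs:' in l]
--         prs = marked[-1].split('Related PRs:', 1)[1].strip() if marked else ''
--         themes.append({'name': header.split('.', 1)[1].strip(), 'prs': prs})
--     return themes
-- ===== Notes on version B (the rewrite author's own statement) =====
-- stated objective: alternative
-- what changed: Replaces A's single stateful fold carrying an open current-theme dict with a two-stage block parser: drop the preamble before the first numbered header, cut the lines into header-led blocks, and summarise each block independently (name from its header, prs from its last 'Related PRs:' line).
import Mathlib
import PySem

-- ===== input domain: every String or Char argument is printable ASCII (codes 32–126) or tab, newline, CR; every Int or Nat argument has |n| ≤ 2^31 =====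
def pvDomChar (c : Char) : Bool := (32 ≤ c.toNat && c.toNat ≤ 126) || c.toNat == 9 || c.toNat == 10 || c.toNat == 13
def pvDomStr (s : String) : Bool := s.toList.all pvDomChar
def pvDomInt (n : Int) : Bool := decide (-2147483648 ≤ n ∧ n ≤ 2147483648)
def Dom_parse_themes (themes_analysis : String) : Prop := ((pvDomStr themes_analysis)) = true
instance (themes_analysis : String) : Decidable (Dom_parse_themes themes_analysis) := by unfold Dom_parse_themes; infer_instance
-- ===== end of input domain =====

-- B re-implements A as a two-stage block parser (drop the preamble, cut at headers, summarise each
-- block); objective: alternative decomposition, same asymptotic cost. Return-value equivalence only.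

-- shared helpers (both Pythons use the same three expressions)
-- line.strip().startswith(('1.', …, '9.'))
def pvHeader (line : String) : Bool :=
  let t := PySem.Str.strip line
  PySem.Str.startswith t "1." || PySem.Str.startswith t "2." || PySem.Str.startswith t "3." ||
  PySem.Str.startswith t "4." || PySem.Str.startswith t "5." || PySem.Str.startswith t "6." ||
  PySem.Str.startswith t "7." || PySem.Str.startswith t "8." || PySem.Str.startswith t "9."

-- line.split('.', 1)[1].strip() — the default "" is unreachable: callers guarantee a '.' in line
def pvNameOf (line : String) : String :=
  PySem.Str.strip (PySem.List.pyGetD ((PySem.Str.splitMax? line "." 1).getD []) 1 "")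

-- line.split('Related PRs:', 1)[1].strip() — the default "" is unreachable: callers guarantee the marker
def pvPrsOf (line : String) : String :=
  PySem.Str.strip (PySem.List.pyGetD ((PySem.Str.splitMax? line "Related PRs:" 1).getD []) 1 "")

-- ===== PORT A =====
-- loop body of A: state = (themes, current_theme)
def pvStepA (st : List (List (String × String)) × Option (PySem.Dict String String)) (line : String) :
    List (List (String × String)) × Option (PySem.Dict String String) :=
  if pvHeader line then
    ((match st.2 with
      | some t => st.1 ++ [t.items]
      | none => st.1),
     some (PySem.Dict.ofList [("name", pvNameOf line), ("prs", "")]))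
  else
    match st.2 with
    | some t =>
        if PySem.Str.isIn "Related PRs:" line then (st.1, some (t.insert "prs" (pvPrsOf line)))
        else st
    | none => st

-- trailing 'if current_theme: themes.append(current_theme)'
def pvFinishA (st : List (List (String × String)) × Option (PySem.Dict String String)) :
    List (List (String × String)) :=
  match st.2 with
  | some t => st.1 ++ [t.items]
  | none => st.1

def parse_themes (themes_analysis : String) : List (List (String × String)) :=
  pvFinishA (((PySem.Str.split? themes_analysis "\n").getD []).foldl pvStepA ([], none))

-- ===== PORT B =====
-- summary of one block: header line plus its body lines
def pvBlockTheme (header : String) (body : List String) : List (String × String) :=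
  let marked := body.filter (fun l => PySem.Str.isIn "Related PRs:" l)
  let prs := match marked.getLast? with
    | some l => pvPrsOf l
    | none => ""
  [("name", pvNameOf header), ("prs", prs)]

-- cut the line list (starting at a header) into blocks, one theme each
def pvBlocks : List String → List (List (String × String))
  | [] => []
  | l :: rest =>
      pvBlockTheme l (rest.takeWhile (fun x => !pvHeader x)) ::
      pvBlocks (rest.dropWhile (fun x => !pvHeader x))
  termination_by ls => ls.length
  decreasing_by
    exact Nat.lt_succ_of_le (List.Sublist.length_le (List.dropWhile_sublist _))

def parse_themes_alt (themes_analysis : String) : List (List (String × String)) :=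
  pvBlocks (((PySem.Str.split? themes_analysis "\n").getD []).dropWhile (fun l => !pvHeader l))

-- ===== PRECONDITION & SPEC =====
def Spec_parse_themes (themes_analysis : String) (out : List (List (String × String))) : Prop := out = parse_themes_alt themes_analysis
instance (themes_analysis : String) (out : List (List (String × String))) : Decidable (Spec_parse_themes themes_analysis out) := by unfold Spec_parse_themes; infer_instance

-- ===== CLAIM (what is proved, stated in full; the proofs are below) =====
def Claim_equal_parse_themes : Prop := ∀ (themes_analysis : String), Dom_parse_themes themes_analysis → Spec_parse_themes themes_analysis (parse_themes themes_analysis)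

-- ===== LEMMAS AND PROOFS =====

-- the current_theme dict always has the shape {'name': n, 'prs': p}
def pvD (n p : String) : PySem.Dict String String := PySem.Dict.ofList [("name", n), ("prs", p)]

theorem pvD_insert (n p v : String) : (pvD n p).insert "prs" v = pvD n v := by
  apply PySem.Dict.ext
  simp [pvD, PySem.Dict.ofList, PySem.Dict.update, PySem.Dict.insert, PySem.Dict.empty,
    PySem.Dict.contains, List.foldl]

theorem pvD_items (n p : String) : (pvD n p).items = [("name", n), ("prs", p)] := rfl

-- running 'prs' value p over a body: last marked line wins
def pvPrsAcc (p : String) (body : List String) : String :=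
  match (body.filter (fun l => PySem.Str.isIn "Related PRs:" l)).getLast? with
  | some l => pvPrsOf l
  | none => p

theorem pvPrsAcc_cons_marked (p : String) (l : String) (body : List String)
    (h : PySem.Str.isIn "Related PRs:" l = true) :
    pvPrsAcc p (l :: body) = pvPrsAcc (pvPrsOf l) body := by
  unfold pvPrsAcc
  rw [List.filter_cons]
  simp only [h, if_true]
  cases hb : body.filter (fun l => PySem.Str.isIn "Related PRs:" l) with
  | nil => simp
  | cons x xs =>
      cases hx : (x :: xs).getLast? with
      | none => simp at hx
      | some y => simp [hx]

theorem pvPrsAcc_cons_unmarked (p : String) (l : String) (body : List String)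
    (h : PySem.Str.isIn "Related PRs:" l = false) :
    pvPrsAcc p (l :: body) = pvPrsAcc p body := by
  unfold pvPrsAcc
  rw [List.filter_cons]
  simp only [h, Bool.false_eq_true, if_false]

-- main invariant while a current theme {'name': n, 'prs': p} is open
theorem pvFold_some (rest : List String) :
    ∀ acc n p, pvFinishA (rest.foldl pvStepA (acc, some (pvD n p))) =
      acc ++ ([("name", n), ("prs", pvPrsAcc p (rest.takeWhile (fun x => !pvHeader x)))] ::
        pvBlocks (rest.dropWhile (fun x => !pvHeader x))) := by
  induction rest with
  | nil => intro acc n p; rw [pvBlocks.eq_def]; simp [pvFinishA, pvPrsAcc, pvD_items]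
  | cons l rest ih =>
      intro acc n p
      by_cases hl : pvHeader l = true
      · simp only [List.foldl_cons, pvStepA, hl, if_true, pvD_items]
        rw [show (PySem.Dict.ofList [("name", pvNameOf l), ("prs", "")]) = pvD (pvNameOf l) "" from rfl]
        rw [ih]
        simp [hl, pvBlocks, pvBlockTheme, pvPrsAcc]
      · rw [Bool.not_eq_true] at hl
        by_cases hm : PySem.Str.isIn "Related PRs:" l = true
        · simp only [List.foldl_cons, pvStepA, hl, Bool.false_eq_true, if_false, hm, if_true,
            pvD_insert]
          rw [ih]
          simp [hl, pvPrsAcc_cons_marked p l _ hm]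
        · rw [Bool.not_eq_true] at hm
          simp only [List.foldl_cons, pvStepA, hl, Bool.false_eq_true, if_false, hm]
          rw [ih]
          simp [hl, pvPrsAcc_cons_unmarked p l _ hm]

-- before the first header the state is inert
theorem pvFold_none (lines : List String) :
    ∀ acc, pvFinishA (lines.foldl pvStepA (acc, none)) =
      acc ++ pvBlocks (lines.dropWhile (fun l => !pvHeader l)) := by
  induction lines with
  | nil => intro acc; simp [pvFinishA, pvBlocks]
  | cons l rest ih =>
      intro acc
      by_cases hl : pvHeader l = true
      · simp only [List.foldl_cons, pvStepA, hl, if_true]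
        rw [show (PySem.Dict.ofList [("name", pvNameOf l), ("prs", "")]) = pvD (pvNameOf l) "" from rfl]
        rw [pvFold_some]
        simp [hl, pvBlocks, pvBlockTheme, pvPrsAcc]
      · rw [Bool.not_eq_true] at hl
        simp only [List.foldl_cons, pvStepA, hl, Bool.false_eq_true, if_false]
        rw [ih]
        simp [hl]

-- ===== VERDICT (by name: the statement is the Claim_ definition above) =====
theorem parse_themes_spec : Claim_equal_parse_themes := by
  intro s _
  unfold Spec_parse_themes parse_themes parse_themes_alt
  rw [pvFold_none]
  simp
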